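-- pv_equiv track=rewrite | github.com/music-mt/BuddhaKG-SSD | ssd/kwic_verify.py | select_representative
-- ===== SOURCE A (Python) =====
-- def select_representative(usages, work_id, focus_keywords, n=5):
--     work_usages = [u for u in usages if u["work"] == work_id]
--     if not work_usages:
--         return []
--
--     keywords = focus_keywords.get(work_id, [])
--
--     # 優先選含焦點關鍵字的 usage
--     scored = []
--     for u in work_usages:
--         ctx   = u.get("context", "")
--         score = sum(1 for kw in keywords if kw in ctx)
--         scored.append((score, u))
--
--     scored.sort(key=lambda x: -x[0])
--     return [u for _, u in scored[:n]]
-- ===== SOURCE B (Python) =====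
-- def select_representative(usages, work_id, focus_keywords, n=5):
--     keywords = focus_keywords.get(work_id, [])
--
--     def score(u):
--         ctx = u.get("context", "")
--         return sum(1 for kw in keywords if kw in ctx)
--
--     # walk the possible scores from high to low; within a score, keep the
--     # original order -- this is exactly what A's stable descending sort yields.
--     picked = [u
--               for s in range(len(keywords), -1, -1)
--               for u in usages
--               if u["work"] == work_id and score(u) == s]
--     return picked[:n]
-- ===== Notes on version B (the rewrite author's own statement) =====
-- stated objective: alternative
-- what changed: B drops the scored-pair list and the comparison sort entirely: a single nested comprehension walks candidate scores from len(keywords) down to 0 and, per score, scans usages for work-matching usages with exactly that score, then trims to n; no intermediate (score,usage) list, no dict, no sort.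
import Mathlib
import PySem

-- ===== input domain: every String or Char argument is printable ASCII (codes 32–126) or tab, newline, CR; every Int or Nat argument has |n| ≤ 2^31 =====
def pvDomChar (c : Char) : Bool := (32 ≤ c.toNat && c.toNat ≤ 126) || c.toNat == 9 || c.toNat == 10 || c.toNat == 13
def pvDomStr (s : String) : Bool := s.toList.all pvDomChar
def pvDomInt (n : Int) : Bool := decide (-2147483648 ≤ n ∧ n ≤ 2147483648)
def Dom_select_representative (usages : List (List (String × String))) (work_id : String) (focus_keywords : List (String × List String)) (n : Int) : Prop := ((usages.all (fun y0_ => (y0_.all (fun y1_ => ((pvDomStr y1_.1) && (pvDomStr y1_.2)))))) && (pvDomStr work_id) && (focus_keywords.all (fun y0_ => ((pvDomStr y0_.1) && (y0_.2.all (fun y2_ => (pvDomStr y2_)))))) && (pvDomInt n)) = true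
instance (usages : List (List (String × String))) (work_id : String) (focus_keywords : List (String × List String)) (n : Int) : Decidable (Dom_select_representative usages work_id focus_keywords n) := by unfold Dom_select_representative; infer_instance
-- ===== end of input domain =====

-- B removes the scored list and the stable sort: one nested comprehension walks candidate
-- scores from len(keywords) down to 0 and scans usages per score (alternative decomposition).

-- ===== PORT A =====
-- u["work"] is ported as getD with default "" — exact under Pre_ (every usage has a "work" key).
def select_representative (usages : List (List (String × String))) (work_id : String) (focus_keywords : List (String × List String)) (n : Int) : List (List (String × String)) :=
  let work_usages := usages.filter (fun u => (PySem.Dict.getD (PySem.Dict.mk u) "work" "") == work_id)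
  if work_usages = [] then []
  else
    let keywords := PySem.Dict.getD (PySem.Dict.mk focus_keywords) work_id []
    let scored := work_usages.foldl (fun acc u =>
      let ctx := PySem.Dict.getD (PySem.Dict.mk u) "context" ""
      let score : Int := (keywords.map (fun kw => if PySem.Str.isIn kw ctx then (1:Int) else 0)).sum
      acc ++ [(score, u)]) []
    (PySem.List.slice (PySem.List.sorted scored (fun x => -x.1) false) none (some n)).map (fun p => p.2)

-- ===== PORT B =====
-- the nested comprehension 'for s in range(K, -1, -1) for u in usages if …' is pyRange.flatMap + filter;
-- 'u["work"]' is the same getD "" convention as A's port (exact under Pre_).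
def select_representative_alt (usages : List (List (String × String))) (work_id : String) (focus_keywords : List (String × List String)) (n : Int) : List (List (String × String)) :=
  let keywords := PySem.Dict.getD (PySem.Dict.mk focus_keywords) work_id []
  let score := fun (u : List (String × String)) =>
    (keywords.map (fun kw => if PySem.Str.isIn kw (PySem.Dict.getD (PySem.Dict.mk u) "context" "") then (1:Int) else 0)).sum
  let picked := (PySem.List.pyRange (keywords.length : Int) (-1) (-1)).flatMap
    (fun s => usages.filter (fun u =>
      ((PySem.Dict.getD (PySem.Dict.mk u) "work" "") == work_id) && (score u == s)))
  PySem.List.slice picked none (some n)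

-- ===== PRECONDITION & SPEC =====
-- Pre_ excludes exactly the inputs on which the Pythons raise KeyError: a usage dict without a "work" key.
def Pre_select_representative (usages : List (List (String × String))) (work_id : String) (focus_keywords : List (String × List String)) (n : Int) : Prop :=
  ∀ u ∈ usages, "work" ∈ u.map Prod.fst
instance (usages : List (List (String × String))) (work_id : String) (focus_keywords : List (String × List String)) (n : Int) : Decidable (Pre_select_representative usages work_id focus_keywords n) := by unfold Pre_select_representative; infer_instance
def pvWitness_select_representative : (List (List (String × String))) × String × (List (String × List String)) × Int :=
  ([[("work", "w1"), ("context", "ab")], [("work", "w1"), ("context", "x")]], "w1", [("w1", ["a", "x"])], 1)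

def Spec_select_representative (usages : List (List (String × String))) (work_id : String) (focus_keywords : List (String × List String)) (n : Int) (out : List (List (String × String))) : Prop := out = select_representative_alt usages work_id focus_keywords n
instance (usages : List (List (String × String))) (work_id : String) (focus_keywords : List (String × List String)) (n : Int) (out : List (List (String × String))) : Decidable (Spec_select_representative usages work_id focus_keywords n out) := by unfold Spec_select_representative; infer_instance

-- ===== CLAIM (what is proved, stated in full; the proofs are below) =====
def Claim_equal_select_representative : Prop := ∀ (usages : List (List (String × String))) (work_id : String) (focus_keywords : List (String × List String)) (n : Int), Dom_select_representative usages work_id focus_keywords n → Pre_select_representative usages work_id focus_keywords n → Spec_select_representative usages work_id focus_keywords n (select_representative usages work_id focus_keywords n)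

-- ===== LEMMAS AND PROOFS =====

theorem pv_insertBy_append_left {α : Type} (before : α → α → Bool) (x : α) (l1 l2 : List α)
    (h : ∀ y ∈ l1, before x y = false) :
    PySem.List.insertBy before x (l1 ++ l2) = l1 ++ PySem.List.insertBy before x l2 := by
  induction l1 with
  | nil => simp
  | cons y ys ih =>
    have hy : before x y = false := h y (by simp)
    simp [PySem.List.insertBy, hy, ih (fun z hz => h z (by simp [hz]))]

theorem pv_insertBy_all_before {α : Type} (before : α → α → Bool) (x : α) (l : List α)
    (h : ∀ y ∈ l, before x y = true) :
    PySem.List.insertBy before x l = x :: l := by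
  cases l with
  | nil => simp [PySem.List.insertBy]
  | cons y ys => simp [PySem.List.insertBy, h y (by simp)]

-- stable sort by descending first component = concatenation of the buckets of a
-- strictly decreasing list of candidate scores covering every first component
theorem pv_sorted_neg_eq_flatMap {β : Type} (ks : List Int) (hks : ks.Pairwise (· > ·))
    (xs : List (Int × β)) (hx : ∀ p ∈ xs, p.1 ∈ ks) :
    PySem.List.sorted xs (fun p => -p.1) false
      = ks.flatMap (fun s => xs.filter (fun p => p.1 == s)) := by
  induction xs using List.reverseRecOn with
  | nil => simp [PySem.List.sorted]
  | append_singleton xs x ih =>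
    have hx' : ∀ p ∈ xs, p.1 ∈ ks := fun p hp => hx p (by simp [hp])
    have hmem : x.1 ∈ ks := hx x (by simp)
    obtain ⟨l1, l2, rfl⟩ := List.append_of_mem hmem
    have hpw := List.pairwise_append.mp hks
    have h12 : ∀ a ∈ l1, ∀ b ∈ (x.1 :: l2), a > b := hpw.2.2
    have h2 : ∀ b ∈ l2, x.1 > b := (List.pairwise_cons.mp hpw.2.1).1
    have lhs : PySem.List.sorted (xs ++ [x]) (fun p => -p.1) false
        = PySem.List.insertBy (fun a b => decide (-a.1 < -b.1)) x
            (PySem.List.sorted xs (fun p => -p.1) false) := by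
      rw [PySem.List.sorted_eq_foldl_insertBy, PySem.List.sorted_eq_foldl_insertBy,
        List.foldl_append]
      rfl
    rw [lhs, ih hx']
    have hfilter : ∀ s : Int, (xs ++ [x]).filter (fun p => p.1 == s)
        = xs.filter (fun p => p.1 == s) ++ (if x.1 == s then [x] else []) := by
      intro s
      rw [List.filter_append, List.filter_singleton]
      cases x.1 == s <;> rfl
    have hne1 : ∀ s ∈ l1, (x.1 == s) = false := by
      intro s hs
      have := h12 s hs x.1 (by simp)
      simp only [beq_eq_false_iff_ne, ne_eq]
      omega
    have hne2 : ∀ s ∈ l2, (x.1 == s) = false := by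
      intro s hs
      have := h2 s hs
      simp only [beq_eq_false_iff_ne, ne_eq]
      omega
    have hb1 : l1.flatMap (fun s => (xs ++ [x]).filter (fun p => p.1 == s))
        = l1.flatMap (fun s => xs.filter (fun p => p.1 == s)) := by
      apply List.flatMap_congr
      intro s hs
      rw [hfilter s, hne1 s hs]
      simp
    have hb2 : l2.flatMap (fun s => (xs ++ [x]).filter (fun p => p.1 == s))
        = l2.flatMap (fun s => xs.filter (fun p => p.1 == s)) := by
      apply List.flatMap_congr
      intro s hs
      rw [hfilter s, hne2 s hs]
      simp
    have rhs : (l1 ++ x.1 :: l2).flatMap (fun s => (xs ++ [x]).filter (fun p => p.1 == s))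
        = l1.flatMap (fun s => xs.filter (fun p => p.1 == s))
          ++ (xs.filter (fun p => p.1 == x.1) ++ [x])
          ++ l2.flatMap (fun s => xs.filter (fun p => p.1 == s)) := by
      rw [List.flatMap_append, List.flatMap_cons, hb1, hb2, hfilter x.1]
      simp
    rw [rhs]
    have hsplit : (l1 ++ x.1 :: l2).flatMap (fun s => xs.filter (fun p => p.1 == s))
        = (l1.flatMap (fun s => xs.filter (fun p => p.1 == s))
            ++ xs.filter (fun p => p.1 == x.1))
          ++ l2.flatMap (fun s => xs.filter (fun p => p.1 == s)) := by
      rw [List.flatMap_append, List.flatMap_cons]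
      simp
    rw [hsplit]
    have hskip : ∀ y ∈ l1.flatMap (fun s => xs.filter (fun p => p.1 == s))
        ++ xs.filter (fun p => p.1 == x.1),
        (decide (-x.1 < -y.1)) = false := by
      intro y hy
      rcases List.mem_append.mp hy with hy | hy
      · obtain ⟨s, hs, hyf⟩ := List.mem_flatMap.mp hy
        have hy1 : y.1 = s := by
          have := List.of_mem_filter hyf
          simpa using this
        have := h12 s hs x.1 (by simp)
        simp only [decide_eq_false_iff_not]
        omega
      · have hy1 : y.1 = x.1 := by
          have := List.of_mem_filter hy
          simpa using this
        simp [hy1]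
    have hafter : ∀ y ∈ l2.flatMap (fun s => xs.filter (fun p => p.1 == s)),
        (decide ((-x.1 : Int) < -y.1)) = true := by
      intro y hy
      obtain ⟨s, hs, hyf⟩ := List.mem_flatMap.mp hy
      have hy1 : y.1 = s := by
        have := List.of_mem_filter hyf
        simpa using this
      have := h2 s hs
      simp only [decide_eq_true_eq]
      omega
    calc PySem.List.insertBy (fun a b => decide (-a.1 < -b.1)) x
          ((l1.flatMap (fun s => xs.filter (fun p => p.1 == s))
            ++ xs.filter (fun p => p.1 == x.1))
           ++ l2.flatMap (fun s => xs.filter (fun p => p.1 == s)))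
        = (l1.flatMap (fun s => xs.filter (fun p => p.1 == s))
            ++ xs.filter (fun p => p.1 == x.1))
          ++ PySem.List.insertBy (fun a b => decide (-a.1 < -b.1)) x
              (l2.flatMap (fun s => xs.filter (fun p => p.1 == s))) := by
          exact pv_insertBy_append_left _ _ _ _ hskip
      _ = (l1.flatMap (fun s => xs.filter (fun p => p.1 == s))
            ++ xs.filter (fun p => p.1 == x.1))
          ++ x :: l2.flatMap (fun s => xs.filter (fun p => p.1 == s)) := by
          rw [pv_insertBy_all_before _ _ _ hafter]
      _ = l1.flatMap (fun s => xs.filter (fun p => p.1 == s))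
          ++ (xs.filter (fun p => p.1 == x.1) ++ [x])
          ++ l2.flatMap (fun s => xs.filter (fun p => p.1 == s)) := by
          simp

theorem pv_slice_to_map {α β : Type} (f : α → β) (xs : List α) (n : Int) :
    PySem.List.slice (xs.map f) none (some n) = (PySem.List.slice xs none (some n)).map f := by
  simp [PySem.List.slice, PySem.List.clampIdx]

theorem pv_score_bounds (kws : List String) (ctx : String) :
    0 ≤ (kws.map (fun kw => if PySem.Str.isIn kw ctx then (1:Int) else 0)).sum ∧
    (kws.map (fun kw => if PySem.Str.isIn kw ctx then (1:Int) else 0)).sum ≤ (kws.length:Int) := by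
  rw [PySem.List.sum_map_ite_one_zero]
  constructor
  · positivity
  · exact_mod_cast List.countP_le_length

-- filtering by a conjunction = staged filters
theorem pv_filter_and {α : Type} (p q : α → Bool) (l : List α) :
    l.filter (fun a => p a && q a) = (l.filter p).filter q := by
  induction l with
  | nil => rfl
  | cons x xs ih =>
    by_cases hp : p x = true <;> by_cases hq : q x = true <;>
      simp [hp, hq, ih]

-- the bodies agree, abstracted over the work filter and the score function
theorem pv_main {β : Type} (us : List β) (workP : β → Bool) (score : β → Int) (Kl : Nat)
    (hb : ∀ u, 0 ≤ score u ∧ score u ≤ (Kl:Int)) (n : Int) :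
    (if us.filter workP = [] then []
     else (PySem.List.slice (PySem.List.sorted
        ((us.filter workP).foldl (fun acc u => acc ++ [(score u, u)]) [])
        (fun x => -x.1) false) none (some n)).map (fun p => p.2))
      = PySem.List.slice ((PySem.List.pyRange (Kl:Int) (-1) (-1)).flatMap
          (fun s => us.filter (fun u => workP u && (score u == s)))) none (some n) := by
  have hcomb : ∀ s : Int, us.filter (fun u => workP u && (score u == s))
      = (us.filter workP).filter (fun u => score u == s) := fun s => pv_filter_and _ _ _
  by_cases hW : us.filter workP = []
  · simp only [hW, if_pos]
    have : ∀ s ∈ PySem.List.pyRange (Kl:Int) (-1) (-1),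
        us.filter (fun u => workP u && (score u == s)) = ([] : List β) := by
      intro s _; rw [hcomb s, hW]; rfl
    rw [List.flatMap_congr this]
    simp [PySem.List.slice, PySem.List.clampIdx]
  · rw [if_neg hW]
    set W := us.filter workP with hWdef
    have hscored : W.foldl (fun acc u => acc ++ [(score u, u)]) []
        = W.map (fun u => (score u, u)) := by
      rw [PySem.List.foldl_append_eq_flatMap (fun u => [(score u, u)])]
      have hfm : ∀ L : List β, L.flatMap (fun u => [(score u, u)]) = L.map (fun u => (score u, u)) := by
        intro L
        induction L with
        | nil => rfl
        | cons y ys ih => simpa using ih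
      simpa using hfm W
    have hks : (PySem.List.pyRange (Kl:Int) (-1) (-1)).Pairwise (· > ·) := by
      rw [PySem.List.pyRange_neg_one_eq_reverse, List.pairwise_reverse]
      exact PySem.List.pairwise_lt_pyRange_one _ _
    have hx : ∀ p ∈ W.map (fun u => (score u, u)), p.1 ∈ PySem.List.pyRange (Kl:Int) (-1) (-1) := by
      intro p hp
      obtain ⟨u, _, rfl⟩ := List.mem_map.mp hp
      rw [PySem.List.mem_pyRange_neg_one]
      have := hb u
      constructor <;> [omega; omega]
    rw [hscored, pv_sorted_neg_eq_flatMap _ hks _ hx, ← pv_slice_to_map, List.map_flatMap]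
    congr 1
    apply List.flatMap_congr
    intro s _
    rw [hcomb s, List.filter_map]
    simp [Function.comp_def]

-- ===== VERDICT (by name: the statement is the Claim_ definition above) =====
theorem select_representative_spec : Claim_equal_select_representative := by
  intro usages work_id focus_keywords n _ _
  unfold Spec_select_representative select_representative select_representative_alt
  exact pv_main usages _ _ _
    (fun u => pv_score_bounds (PySem.Dict.getD (PySem.Dict.mk focus_keywords) work_id [])
      (PySem.Dict.getD (PySem.Dict.mk u) "context" "")) n
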